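-- pv_equiv track=rewrite | github.com/a-brandon/practice | codewars/sort_sentence_pseudo_alphabetically.py | pseudo_sort
-- ===== SOURCE A (Python) =====
-- def pseudo_sort(st):
--     words = ''.join(c for c in st if c.isalpha() or c.isspace()).split()
--     lower, upper = [], []
--
--     for w in words:
--         if w[0].isupper():
--             upper.append(w)
--         else:
--             lower.append(w)
--
--     return ' '.join(sorted(lower) + sorted(upper, reverse=True))
-- ===== SOURCE B (Python) =====
-- def pseudo_sort(st):
--     # one-pass tokenizer: letters accumulate, whitespace flushes a word, anything else is skipped
--     words = []
--     cur = ''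
--     for c in st:
--         if c.isalpha():
--             cur += c
--         elif c.isspace():
--             if cur:
--                 words.append(cur)
--             cur = ''
--     if cur:
--         words.append(cur)
--
--     def before(a, b):
--         ua, ub = a[0].isupper(), b[0].isupper()
--         if ua != ub:
--             return ub          # lower-initial words come before upper-initial ones
--         if not ua:
--             return a < b       # lower group: ascending
--         return b < a           # upper group: descending
--
--     out = []
--     for w in words:            # insertion sort under the single comparator
--         i = 0
--         while i < len(out) and before(out[i], w):
--             i += 1
--         out.insert(i, w)
--     return ' '.join(out)
-- ===== Notes on version B (the rewrite author's own statement) =====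
-- stated objective: alternative
-- what changed: B replaces A's filter-join-split plus partition plus two library sorts by a one-pass character tokenizer and a single insertion sort under one three-way comparator (lower-initial before upper-initial, ascending within lower, descending within upper).
import Mathlib
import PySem

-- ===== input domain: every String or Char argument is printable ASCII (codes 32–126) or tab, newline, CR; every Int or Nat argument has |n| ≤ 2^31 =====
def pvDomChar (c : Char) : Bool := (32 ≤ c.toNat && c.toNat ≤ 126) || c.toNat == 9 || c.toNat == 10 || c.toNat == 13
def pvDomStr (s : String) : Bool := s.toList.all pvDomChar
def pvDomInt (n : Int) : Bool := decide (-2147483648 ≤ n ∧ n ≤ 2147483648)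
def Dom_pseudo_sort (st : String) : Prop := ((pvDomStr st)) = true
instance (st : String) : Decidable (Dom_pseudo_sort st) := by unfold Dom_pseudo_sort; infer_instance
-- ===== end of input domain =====

-- B replaces A's filter-split-partition-and-two-library-sorts pipeline by a one-pass
-- character tokenizer followed by an insertion sort under a single three-way comparator
-- (alternative decomposition; same return value).

-- w[0].isupper() (words produced by the split/tokenizer are nonempty, so pyGet? never returns none here)
def pvFirstUpper (w : String) : Bool :=
  match PySem.Str.pyGet? w 0 with
  | some c => PySem.Chars.isupper c
  | none => false

-- ===== PORT A =====
-- A's line: ''.join(c for c in st if c.isalpha() or c.isspace()).split()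
def pvWords (st : String) : List String :=
  PySem.Str.split₀ (String.ofList (st.toList.filter (fun c => PySem.Chars.isalpha c || PySem.Chars.isspace c)))

def pseudo_sort (st : String) : String :=
  let words := pvWords st
  let lu := words.foldl
    (fun lu w => if pvFirstUpper w then (lu.1, lu.2 ++ [w]) else (lu.1 ++ [w], lu.2))
    (([], []) : List String × List String)
  PySem.Str.join " " (PySem.List.sorted lu.1 (fun x => x) false ++ PySem.List.sorted lu.2 (fun x => x) true)

-- ===== PORT B =====
-- one step of B's tokenizer loop: letters extend the current word, whitespace flushes it,
-- anything else is skipped (cur is kept as a List Char; Python's cur += c is cur ++ [c])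
def pvTokStep (s : List String × List Char) (c : Char) : List String × List Char :=
  if PySem.Chars.isalpha c then (s.1, s.2 ++ [c])
  else if PySem.Chars.isspace c then
    (if s.2.isEmpty then (s.1, []) else (s.1 ++ [String.ofList s.2], []))
  else s

-- B's comparator before(a, b)
def pvBefore (a b : String) : Bool :=
  let ua := pvFirstUpper a
  let ub := pvFirstUpper b
  if ua != ub then ub
  else if !ua then decide (a < b)
  else decide (b < a)

-- B's while-scan + out.insert(i, w), ported as the usual recursion over out
def pvIns (out : List String) (w : String) : List String :=
  match out with
  | [] => [w]
  | x :: t => if pvBefore x w then x :: pvIns t w else w :: x :: t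

def pseudo_sort_alt (st : String) : String :=
  let s := st.toList.foldl pvTokStep ([], [])
  let words := if s.2.isEmpty then s.1 else s.1 ++ [String.ofList s.2]
  PySem.Str.join " " (words.foldl pvIns [])

-- ===== PRECONDITION & SPEC =====
def Spec_pseudo_sort (st : String) (out : String) : Prop := out = pseudo_sort_alt st
instance (st : String) (out : String) : Decidable (Spec_pseudo_sort st out) := by unfold Spec_pseudo_sort; infer_instance

-- ===== CLAIM (what is proved, stated in full; the proofs are below) =====
def Claim_equal_pseudo_sort : Prop := ∀ (st : String), Dom_pseudo_sort st → Spec_pseudo_sort st (pseudo_sort st)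

-- ===== LEMMAS AND PROOFS =====

-- no character is both alphabetic and whitespace
theorem pvAlphaNotSpace (c : Char) (h : PySem.Chars.isalpha c = true) :
    PySem.Chars.isspace c = false := by
  simp [PySem.Chars.isalpha, PySem.Chars.isupper, PySem.Chars.islower, Char.le_def] at h
  have hn : (65 ≤ c.toNat ∧ c.toNat ≤ 90) ∨ (97 ≤ c.toNat ∧ c.toNat ≤ 122) := by
    rcases h with ⟨h1, h2⟩ | ⟨h1, h2⟩ <;>
      [left; right] <;>
      exact ⟨UInt32.le_iff_toNat_le.mp h1, UInt32.le_iff_toNat_le.mp h2⟩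
  simp only [PySem.Chars.isspace, Bool.or_eq_false_iff, Bool.and_eq_false_iff,
    decide_eq_false_iff_not]
  omega

-- split₀.go's accumulator is just prepended output
theorem pvGoAcc (cs : List Char) (cur : List Char) (acc : List (List Char)) :
    PySem.Chars.split₀.go cs cur acc = acc.reverse ++ PySem.Chars.split₀.go cs cur [] := by
  induction cs generalizing cur acc with
  | nil => by_cases h : cur.isEmpty <;> simp [PySem.Chars.split₀.go, h]
  | cons c rest ih =>
    by_cases hs : PySem.Chars.isspace c
    · by_cases hc : cur.isEmpty <;> simp only [PySem.Chars.split₀.go, hs, hc, if_true,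
        Bool.false_eq_true, if_false]
      · exact ih [] acc
      · rw [ih [] (cur.reverse :: acc), ih [] [cur.reverse]]
        simp
    · simp only [PySem.Chars.split₀.go, hs, Bool.false_eq_true, if_false]
      exact ih _ _

-- B's tokenizer computes A's filter-then-split word list
theorem pvTok (cs : List Char) (ws : List String) (cur : List Char) :
    (let s := cs.foldl pvTokStep (ws, cur)
     if s.2.isEmpty then s.1 else s.1 ++ [String.ofList s.2])
      = ws ++ (PySem.Chars.split₀.go
          (cs.filter (fun c => PySem.Chars.isalpha c || PySem.Chars.isspace c)) cur.reverse []).map String.ofList := by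
  induction cs generalizing ws cur with
  | nil =>
    by_cases h : cur.isEmpty <;>
      simp_all [PySem.Chars.split₀.go, List.isEmpty_iff]
  | cons c rest ih =>
    by_cases ha : PySem.Chars.isalpha c
    · have hs := pvAlphaNotSpace c ha
      simp only [List.foldl_cons, List.filter_cons, pvTokStep, ha, hs, Bool.true_or, if_true,
        Bool.false_eq_true, if_false]
      rw [ih]
      simp [PySem.Chars.split₀.go, hs]
    · by_cases hs : PySem.Chars.isspace c
      · simp only [List.foldl_cons, List.filter_cons, pvTokStep, ha, hs, Bool.false_or, if_true,
          Bool.false_eq_true, if_false]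
        by_cases hc : cur.isEmpty
        · have hc' : cur = [] := List.isEmpty_iff.mp hc
          subst hc'
          simp only [hc, if_true, PySem.Chars.split₀.go, hs, List.reverse_nil]
          exact ih ws []
        · have hc' : cur ≠ [] := by simpa [List.isEmpty_iff] using hc
          simp only [hc, Bool.false_eq_true, if_false]
          rw [ih]
          simp only [PySem.Chars.split₀.go, hs, if_true]
          have hrev : cur.reverse.isEmpty = false := by simp [hc']
          rw [hrev]
          simp only [Bool.false_eq_true, if_false, List.reverse_reverse]
          rw [pvGoAcc _ [] [cur]]
          simp
      · simp only [List.foldl_cons, List.filter_cons, pvTokStep, ha, hs, Bool.false_or,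
          Bool.false_eq_true, if_false]
        exact ih ws cur

-- the comparator is asymmetric …
theorem pvBeforeAsymm (a b : String) (h : pvBefore a b = true) : pvBefore b a = false := by
  unfold pvBefore at h ⊢
  by_cases ha : pvFirstUpper a <;> by_cases hb : pvFirstUpper b <;>
    simp [ha, hb] at h ⊢ <;>
    first | exact h | exact le_of_lt h

-- … its complement is antisymmetric …
theorem pvBeforeAntisymm (a b : String) (h1 : pvBefore a b = false) (h2 : pvBefore b a = false) :
    a = b := by
  unfold pvBefore at h1 h2
  by_cases ha : pvFirstUpper a <;> by_cases hb : pvFirstUpper b <;>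
    simp [ha, hb] at h1 h2 <;>
    first
      | exact String.toList_inj.mp (le_antisymm h1 h2)
      | exact String.toList_inj.mp (le_antisymm h2 h1)

-- … and its complement is transitive
theorem pvBeforeNegTrans (a b c : String) (h1 : pvBefore b a = false) (h2 : pvBefore c b = false) :
    pvBefore c a = false := by
  unfold pvBefore at h1 h2 ⊢
  by_cases ha : pvFirstUpper a <;> by_cases hb : pvFirstUpper b <;> by_cases hc : pvFirstUpper c <;>
    simp [ha, hb, hc] at h1 h2 ⊢ <;>
    first
      | exact le_trans h1 h2
      | exact le_trans h2 h1

-- pvIns inserts, as a multiset operation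
theorem pvInsPerm (out : List String) (w : String) : (pvIns out w).Perm (w :: out) := by
  induction out with
  | nil => simp [pvIns]
  | cons x t ih =>
    by_cases h : pvBefore x w <;> simp [pvIns, h]
    exact (ih.cons x).trans (List.Perm.swap w x t)

-- the sortedness invariant maintained by pvIns
theorem pvInsPairwise (out : List String) (w : String)
    (h : out.Pairwise (fun a b => pvBefore b a = false)) :
    (pvIns out w).Pairwise (fun a b => pvBefore b a = false) := by
  induction out with
  | nil => simp [pvIns]
  | cons x t ih =>
    rw [List.pairwise_cons] at h
    by_cases hx : pvBefore x w
    · simp only [pvIns, hx, if_true]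
      rw [List.pairwise_cons]
      refine ⟨fun y hy => ?_, ih h.2⟩
      rcases List.mem_cons.mp ((pvInsPerm t w).mem_iff.mp hy) with hyw | hyt
      · subst hyw; exact pvBeforeAsymm x y hx
      · exact h.1 y hyt
    · simp only [pvIns, hx, Bool.false_eq_true, if_false]
      rw [List.pairwise_cons]
      refine ⟨fun y hy => ?_, List.pairwise_cons.mpr h⟩
      rcases List.mem_cons.mp hy with hyx | hyt
      · subst hyx; simpa using hx
      · exact pvBeforeNegTrans w x y (by simpa using hx) (h.1 y hyt)

theorem pvFoldlInsPerm (ws out : List String) : (ws.foldl pvIns out).Perm (out ++ ws) := by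
  induction ws generalizing out with
  | nil => simp
  | cons w t ih =>
    simp only [List.foldl_cons]
    refine (ih (pvIns out w)).trans ?_
    have h1 : (pvIns out w ++ t).Perm ((w :: out) ++ t) := (pvInsPerm out w).append_right t
    refine h1.trans ?_
    simp only [List.cons_append]
    exact List.perm_middle.symm

theorem pvFoldlInsPairwise (ws out : List String)
    (h : out.Pairwise (fun a b => pvBefore b a = false)) :
    (ws.foldl pvIns out).Pairwise (fun a b => pvBefore b a = false) := by
  induction ws generalizing out with
  | nil => exact h
  | cons w t ih => exact ih _ (pvInsPairwise out w h)

-- A's partition loop is the two filters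
theorem pvPartition (ws : List String) (l u : List String) :
    ws.foldl (fun lu w => if pvFirstUpper w then (lu.1, lu.2 ++ [w]) else (lu.1 ++ [w], lu.2)) (l, u)
      = (l ++ ws.filter (fun w => ! pvFirstUpper w), u ++ ws.filter (fun w => pvFirstUpper w)) := by
  induction ws generalizing l u with
  | nil => simp
  | cons w t ih =>
    by_cases h : pvFirstUpper w = true <;> simp [h, ih]

-- A's concatenation of the two sorted groups is the unique pvBefore-ordered rearrangement,
-- so it equals B's insertion-sorted list
theorem pvMain (ws : List String) :
    PySem.List.sorted (ws.filter (fun w => ! pvFirstUpper w)) (fun x => x) false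
      ++ PySem.List.sorted (ws.filter (fun w => pvFirstUpper w)) (fun x => x) true
      = ws.foldl pvIns [] := by
  set l := ws.filter (fun w => ! pvFirstUpper w) with hl
  set u := ws.filter (fun w => pvFirstUpper w) with hu
  have hfe : ws.filter (fun x => !(! pvFirstUpper x)) = u := by
    rw [hu]; apply List.filter_congr; intro x _; simp
  have hperm : (PySem.List.sorted l (fun x => x) false
      ++ PySem.List.sorted u (fun x => x) true).Perm ws := by
    refine ((PySem.List.sorted_perm _ _ _).append (PySem.List.sorted_perm _ _ _)).trans ?_
    rw [← hfe, hl]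
    exact List.filter_append_perm _ ws
  have hpl : ∀ w ∈ l, pvFirstUpper w = false := by
    intro w hw; rw [hl] at hw; simpa using (List.of_mem_filter hw)
  have hpu : ∀ w ∈ u, pvFirstUpper w = true := by
    intro w hw; rw [hu] at hw; simpa using (List.of_mem_filter hw)
  have hpair : (PySem.List.sorted l (fun x => x) false
      ++ PySem.List.sorted u (fun x => x) true).Pairwise (fun a b => pvBefore b a = false) := by
    rw [List.pairwise_append]
    refine ⟨?_, ?_, ?_⟩
    · refine (PySem.List.sorted_pairwise l (fun x => x)).imp_of_mem ?_
      intro a b hma hmb hab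
      have ha := hpl a ((PySem.List.mem_sorted _ _ _ _).mp hma)
      have hb := hpl b ((PySem.List.mem_sorted _ _ _ _).mp hmb)
      simp [pvBefore, ha, hb]
      first | exact hab | simpa using hab
    · refine (PySem.List.sorted_pairwise_rev u (fun x => x)).imp_of_mem ?_
      intro a b hma hmb hab
      have ha := hpu a ((PySem.List.mem_sorted _ _ _ _).mp hma)
      have hb := hpu b ((PySem.List.mem_sorted _ _ _ _).mp hmb)
      simp [pvBefore, ha, hb]
      first | exact hab | simpa using hab
    · intro a hma b hmb
      have ha := hpl a ((PySem.List.mem_sorted _ _ _ _).mp hma)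
      have hb := hpu b ((PySem.List.mem_sorted _ _ _ _).mp hmb)
      simp [pvBefore, ha, hb]
  refine List.Perm.eq_of_pairwise ?_ hpair (pvFoldlInsPairwise ws [] (by simp)) ?_
  · intro a b _ _ h1 h2
    exact pvBeforeAntisymm a b h2 h1
  · exact hperm.trans (pvFoldlInsPerm ws []).symm

-- ===== VERDICT (by name: the statement is the Claim_ definition above) =====
theorem pseudo_sort_spec : Claim_equal_pseudo_sort := by
  intro st _
  show pseudo_sort st = pseudo_sort_alt st
  simp only [pseudo_sort, pseudo_sort_alt]
  rw [pvPartition]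
  simp only [List.nil_append]
  have htok := pvTok st.toList [] []
  simp only [List.reverse_nil] at htok
  rw [htok]
  have hwords : (PySem.Chars.split₀.go
      (st.toList.filter (fun c => PySem.Chars.isalpha c || PySem.Chars.isspace c)) [] []).map String.ofList
      = pvWords st := by
    simp [pvWords, PySem.Str.split₀, PySem.Chars.split₀]
  simp only [List.nil_append]
  rw [hwords, ← pvMain (pvWords st)]
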